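-- pv_equiv track=rewrite | github.com/SynoCommunity/spksrc-check-update | makefile_parser/makefile_parser.py | _generate_str_possibility
-- ===== SOURCE A (Python) =====
-- def _generate_str_possibility(arr):
--     str_arr = []
--     str_arr.append('')
--
--     for s_arr in arr:
--         new_arr = []
--         for curr_str in str_arr:
--             for k,v in enumerate(s_arr):
--                 new_arr.append(curr_str + v)
--         str_arr = new_arr
--
--     return str_arr
-- ===== SOURCE B (Python) =====
-- import itertools
--
-- def _generate_str_possibility(arr):
--     return [''.join(combo) for combo in itertools.product(*arr)]
-- ===== Notes on version B (the rewrite author's own statement) =====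
-- stated objective: idiomatic
-- what changed: Replaces the hand-maintained, repeatedly re-extended prefix-accumulator list with direct enumeration of the Cartesian product via itertools.product, joining each combination in one step.
import Mathlib
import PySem

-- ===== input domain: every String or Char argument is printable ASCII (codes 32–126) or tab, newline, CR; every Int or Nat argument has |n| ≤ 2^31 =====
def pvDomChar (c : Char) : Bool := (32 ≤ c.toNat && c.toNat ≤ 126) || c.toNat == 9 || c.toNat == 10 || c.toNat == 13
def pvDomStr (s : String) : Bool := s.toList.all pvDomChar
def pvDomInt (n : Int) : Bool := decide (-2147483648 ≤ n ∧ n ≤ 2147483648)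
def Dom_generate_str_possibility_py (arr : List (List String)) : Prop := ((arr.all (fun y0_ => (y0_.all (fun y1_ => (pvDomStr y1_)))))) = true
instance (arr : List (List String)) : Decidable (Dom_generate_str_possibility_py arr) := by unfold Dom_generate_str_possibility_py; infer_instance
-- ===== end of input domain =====

-- B replaces the hand-grown prefix-accumulator with direct enumeration of the
-- Cartesian product (itertools.product) joined per combination; objective: idiomatic.

-- ===== PORT A =====
-- literal port: outer loop over arr, middle loop over str_arr, inner loop over enumerate(s_arr)
def generate_str_possibility_py (arr : List (List String)) : List String :=
  arr.foldl
    (fun str_arr s_arr =>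
      str_arr.foldl
        (fun new_arr curr_str =>
          (PySem.List.enumerate s_arr).foldl
            (fun na kv => na ++ [curr_str ++ kv.2]) new_arr)
        [])
    [""]

-- ===== PORT B =====
-- itertools.product(*arr), varying the last array fastest
def pyProduct (arr : List (List String)) : List (List String) :=
  match arr with
  | [] => [[]]
  | xs :: rest => xs.flatMap (fun x => (pyProduct rest).map (fun t => x :: t))

-- ''.join(combo) for each combo of the product
def generate_str_possibility_py_alt (arr : List (List String)) : List String :=
  (pyProduct arr).map (fun combo => PySem.Str.join "" combo)

-- ===== PRECONDITION & SPEC =====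
def Spec_generate_str_possibility_py (arr : List (List String)) (out : List String) : Prop := out = generate_str_possibility_py_alt arr
instance (arr : List (List String)) (out : List String) : Decidable (Spec_generate_str_possibility_py arr out) := by unfold Spec_generate_str_possibility_py; infer_instance

-- ===== CLAIM (what is proved, stated in full; the proofs are below) =====
def Claim_equal_generate_str_possibility_py : Prop := ∀ (arr : List (List String)), Dom_generate_str_possibility_py arr → Spec_generate_str_possibility_py arr (generate_str_possibility_py arr)

-- ===== LEMMAS AND PROOFS =====

lemma join_empty_cons (x : String) (t : List String) :
    PySem.Str.join "" (x :: t) = x ++ PySem.Str.join "" t := by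
  cases t with
  | nil => simp [PySem.Str.join, PySem.Chars.join_singleton, PySem.Chars.join_nil]
  | cons y r =>
      simp [PySem.Str.join, PySem.Chars.join_cons_cons]

-- A's inner loop ('for k,v in enumerate(s_arr): new_arr.append(curr_str+v)')
lemma inner_eq (xs : List String) (c : String) (na : List String) :
    (PySem.List.enumerate xs).foldl (fun na kv => na ++ [c ++ kv.2]) na
      = na ++ xs.map (fun v => c ++ v) := by
  rw [PySem.List.foldl_append_singleton_eq_map (fun kv : Int × String => c ++ kv.2)]
  rw [show List.map (fun kv : Int × String => c ++ kv.2) (PySem.List.enumerate xs)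
        = List.map (fun v => c ++ v) (List.map (fun kv : Int × String => kv.2) (PySem.List.enumerate xs)) by
      rw [List.map_map]; rfl]
  rw [PySem.List.map_snd_enumerate]

-- A's middle+inner loops build acc ++ pref.flatMap (fun c => xs.map (c ++ ·))
lemma step_eq (xs : List String) : ∀ (pref acc : List String),
    pref.foldl
      (fun new_arr curr_str =>
        (PySem.List.enumerate xs).foldl
          (fun na kv => na ++ [curr_str ++ kv.2]) new_arr)
      acc = acc ++ pref.flatMap (fun c => xs.map (fun v => c ++ v)) := by
  intro pref
  induction pref with
  | nil => intro acc; simp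
  | cons c pref ih =>
      intro acc
      rw [List.foldl_cons, inner_eq, ih, List.flatMap_cons, List.append_assoc]

-- main invariant: folding A's outer loop from any prefix list equals
-- prefixing every joined product combination
lemma fold_eq (arr : List (List String)) : ∀ (pref : List String),
    arr.foldl
      (fun str_arr s_arr =>
        str_arr.foldl
          (fun new_arr curr_str =>
            (PySem.List.enumerate s_arr).foldl
              (fun na kv => na ++ [curr_str ++ kv.2]) new_arr)
          [])
      pref
    = pref.flatMap (fun c => (pyProduct arr).map (fun t => c ++ PySem.Str.join "" t)) := by
  induction arr with
  | nil =>
      intro pref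
      simp [pyProduct, PySem.Str.join, PySem.Chars.join_nil, List.flatMap_singleton']
  | cons xs rest ih =>
      intro pref
      rw [List.foldl_cons, step_eq, ih, List.nil_append]
      rw [show (pref.flatMap (fun c => xs.map (fun v => c ++ v))).flatMap
            (fun c => (pyProduct rest).map (fun t => c ++ PySem.Str.join "" t))
          = pref.flatMap (fun c => (xs.map (fun v => c ++ v)).flatMap
              (fun c => (pyProduct rest).map (fun t => c ++ PySem.Str.join "" t)))
          from List.flatMap_assoc]
      congr 1; funext c
      simp only [pyProduct, List.map_flatMap, List.flatMap_map, List.map_map]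
      congr 1; funext x
      congr 1; funext t
      simp only [Function.comp_apply, join_empty_cons, String.append_assoc]

-- ===== VERDICT (by name: the statement is the Claim_ definition above) =====
theorem generate_str_possibility_py_spec : Claim_equal_generate_str_possibility_py := by
  intro arr _
  unfold Spec_generate_str_possibility_py generate_str_possibility_py generate_str_possibility_py_alt
  rw [fold_eq]
  simp
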